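-- pv_equiv track=rewrite | github.com/Maxitoth/MIPS | istruzioni_mips.py | sll_bit
-- ===== SOURCE A (Python) =====
-- def tohex(val, nbits):
--     return hex((val + (1 << nbits)) % (1 << nbits))
--
-- def sll_bit(esadecimale, val):
--     stringa_bin_ris = ""
--     stringa_bin_secondaria = ""
--     zero = "0"
--     stringa_shifter = ""
--     esadecimale = esadecimale[2:]
--     esadecimale_ris = ""
--     # Devo avere 8 esadecimali (aggiungo zeri)
--     esadecimale_ris = esadecimale_ris.join(zero for _ in range(8-len(esadecimale))) + esadecimale
--     # Numero di zeri da aggiungere per lo shift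
--     stringa_shifter = stringa_shifter.join(zero for _ in range(0, val))
--     for elem in esadecimale_ris: # Converto ogni esadecimale in binario (4 bit per ogni esadecimale)
--         stringa_bin_secondaria = bin(int(elem,16))[2:] # rimuovo 0b ([2:])
--         # Servono 4 bit (aggiungo zeri)
--         stringa_bin_secondaria = ''.join(zero for _ in range(4-len(stringa_bin_secondaria))) + stringa_bin_secondaria
--         stringa_bin_ris += stringa_bin_secondaria
--     stringa_bin_ris = stringa_bin_ris[-len(stringa_bin_ris)+val:] + stringa_shifter # Ottengo la stringa risultante dallo shift
--     stringa_bin_ris = tohex(int(stringa_bin_ris,2),32) # Riconverto in esadecimale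
--     return stringa_bin_ris
-- ===== SOURCE B (Python) =====
-- def tohex(val, nbits):
--     return hex((val + (1 << nbits)) % (1 << nbits))
--
-- def sll_bit(esadecimale, val):
--     v = int(esadecimale[2:] or "0", 16)
--     return tohex(v << max(val, 0), 32)
-- ===== Notes on version B (the rewrite author's own statement) =====
-- stated objective: faster
-- what changed: Replaces A's per-hex-digit binary-string assembly, string slicing/padding shift and base-2 reparse by a single integer expression: parse the hex payload once and shift left by max(val,0), letting tohex's mod 2**32 do the 32-bit truncation.
import Mathlib
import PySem

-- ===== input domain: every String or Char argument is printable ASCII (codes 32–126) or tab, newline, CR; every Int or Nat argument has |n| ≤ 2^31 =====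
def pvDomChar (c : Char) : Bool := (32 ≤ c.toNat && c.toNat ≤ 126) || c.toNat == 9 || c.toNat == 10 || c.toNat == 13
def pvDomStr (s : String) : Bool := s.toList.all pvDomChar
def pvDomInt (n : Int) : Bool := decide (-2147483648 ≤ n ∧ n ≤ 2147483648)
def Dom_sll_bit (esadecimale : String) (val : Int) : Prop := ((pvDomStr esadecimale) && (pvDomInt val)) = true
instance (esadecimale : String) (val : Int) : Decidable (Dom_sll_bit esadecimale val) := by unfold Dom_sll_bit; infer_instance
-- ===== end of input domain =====

-- B replaces A's per-hex-digit binary-string assembly, string-slice shift and base-2 reparse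
-- by one integer parse and one arithmetic shift (tohex's mod 2^32 supplies the truncation).

-- ===== PORT A =====

-- int(c, 16) for a single hex-digit character (under Pre_ every character A parses is a
-- hex digit, and on such a character Python's int is exactly this digit value)
def hexVal (c : Char) : Nat :=
  if 48 ≤ c.toNat ∧ c.toNat ≤ 57 then c.toNat - 48
  else if 97 ≤ c.toNat then c.toNat - 87 else c.toNat - 55

-- int(s, 2) for the strings A feeds it: under Pre_ they are nonempty and all '0'/'1'
-- (no sign/space/underscore ever occurs), where Python's int is exactly this positional fold
def binVal (cs : List Char) : Nat := cs.foldl (fun a c => 2 * a + (if c = '1' then 1 else 0)) 0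

-- tohex(val, nbits), shared module helper of A and B; hex(m) hand-ported as
-- "0x" + lowercase digits, exact for the m ≥ 0 that tohex always passes to it;
-- 1 << nbits ported as 2 ^ nbits.toNat, exact for nbits ≥ 0 (both calls use nbits = 32)
def tohex (val : Int) (nbits : Int) : String :=
  String.ofList ('0' :: 'x' :: Nat.toDigits 16 (PySem.Int.mod (val + 2 ^ nbits.toNat) (2 ^ nbits.toNat)).toNat)

-- one body of A's for-loop: bin(int(elem,16))[2:], zero-padded on the left to 4 bits
def binGroup (elem : Char) : List Char :=
  let s := (PySem.Int.toBinChars0b (hexVal elem)).drop 2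
  (PySem.List.pyRange 0 (4 - (s.length : Int)) 1).map (fun _ => '0') ++ s

def sll_bit (esadecimale : String) (val : Int) : String :=
  let esad := PySem.List.slice esadecimale.toList (some 2) none
  let esadRis := (PySem.List.pyRange 0 (8 - PySem.List.len esad) 1).map (fun _ => '0') ++ esad
  let shifter := (PySem.List.pyRange 0 val 1).map (fun _ => '0')
  let bin := esadRis.foldl (fun acc elem => acc ++ binGroup elem) ([] : List Char)
  let shifted := PySem.List.slice bin (some (-PySem.List.len bin + val)) none ++ shifter
  tohex (binVal shifted) 32

-- ===== PORT B =====

-- int(s, 16) for the strings B feeds it: under Pre_ they are nonempty and all hex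
-- digits, where Python's int is exactly this positional fold (cf. hexVal)
def hexNum (cs : List Char) : Nat := cs.foldl (fun a c => 16 * a + hexVal c) 0

def sll_bit_alt (esadecimale : String) (val : Int) : String :=
  let s := PySem.List.slice esadecimale.toList (some 2) none
  let v := hexNum (if s = [] then ['0'] else s)   -- int(esadecimale[2:] or "0", 16)
  tohex ((v : Int) * 2 ^ (max val 0).toNat) 32    -- v << max(val, 0)

-- ===== PRECONDITION & SPEC =====
def isHexChar (c : Char) : Bool :=
  (48 ≤ c.toNat && c.toNat ≤ 57) || (97 ≤ c.toNat && c.toNat ≤ 102) || (65 ≤ c.toNat && c.toNat ≤ 70)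

-- exactly the inputs on which A returns: every character after the first two is a hex
-- digit (on any other input A's int(elem, 16) raises ValueError)
def Pre_sll_bit (esadecimale : String) (val : Int) : Prop :=
  (esadecimale.toList.drop 2).all isHexChar = true
instance (esadecimale : String) (val : Int) : Decidable (Pre_sll_bit esadecimale val) := by
  unfold Pre_sll_bit; infer_instance

def pvWitness_sll_bit : String × Int := ("0xdeadBEEF", 7)

def Spec_sll_bit (esadecimale : String) (val : Int) (out : String) : Prop := out = sll_bit_alt esadecimale val
instance (esadecimale : String) (val : Int) (out : String) : Decidable (Spec_sll_bit esadecimale val out) := by unfold Spec_sll_bit; infer_instance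

-- ===== CLAIM (what is proved, stated in full; the proofs are below) =====
def Claim_equal_sll_bit : Prop := ∀ (esadecimale : String) (val : Int), Dom_sll_bit esadecimale val → Pre_sll_bit esadecimale val → Spec_sll_bit esadecimale val (sll_bit esadecimale val)

-- ===== LEMMAS AND PROOFS =====

theorem binVal_foldl (ys : List Char) (a : Nat) :
    ys.foldl (fun a c => 2 * a + (if c = '1' then 1 else 0)) a = a * 2 ^ ys.length + binVal ys := by
  induction ys generalizing a with
  | nil => simp [binVal]
  | cons c ys ih =>
    simp only [List.foldl_cons, List.length_cons, binVal] at *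
    rw [ih, ih (2 * 0 + _)]
    ring

theorem hexNum_foldl (ys : List Char) (a : Nat) :
    ys.foldl (fun a c => 16 * a + hexVal c) a = a * 16 ^ ys.length + hexNum ys := by
  induction ys generalizing a with
  | nil => simp [hexNum]
  | cons c ys ih =>
    simp only [List.foldl_cons, List.length_cons, hexNum] at *
    rw [ih, ih (16 * 0 + _)]
    ring

theorem binVal_append (xs ys : List Char) :
    binVal (xs ++ ys) = binVal xs * 2 ^ ys.length + binVal ys := by
  simp only [binVal, List.foldl_append]
  exact binVal_foldl ys _

theorem hexNum_append (xs ys : List Char) :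
    hexNum (xs ++ ys) = hexNum xs * 16 ^ ys.length + hexNum ys := by
  simp only [hexNum, List.foldl_append]
  exact hexNum_foldl ys _

theorem binVal_replicate_zero (k : Nat) : binVal (List.replicate k '0') = 0 := by
  induction k with
  | zero => rfl
  | succ k ih =>
    rw [List.replicate_succ]
    simp only [binVal, List.foldl_cons] at *
    simpa using ih

theorem hexNum_replicate_zero (k : Nat) : hexNum (List.replicate k '0') = 0 := by
  induction k with
  | zero => rfl
  | succ k ih =>
    rw [List.replicate_succ]
    simp only [hexNum, List.foldl_cons] at *
    simpa [hexVal] using ih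

theorem hexVal_lt (c : Char) (h : isHexChar c = true) : hexVal c < 16 := by
  simp [isHexChar] at h
  unfold hexVal
  split_ifs <;> omega

-- binGroup depends on its character only through hexVal, so its 16 possible values
-- can be checked by decide
def binGroupN (k : Nat) : List Char :=
  let s := (PySem.Int.toBinChars0b k).drop 2
  (PySem.List.pyRange 0 (4 - (s.length : Int)) 1).map (fun _ => '0') ++ s

theorem binGroup_eq (c : Char) : binGroup c = binGroupN (hexVal c) := rfl

theorem binGroupN_spec : ∀ k : Nat, k < 16 → (binGroupN k).length = 4 ∧ binVal (binGroupN k) = k := by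
  decide

theorem binVal_flatMap (hs : List Char) (h : ∀ c ∈ hs, isHexChar c = true) :
    (hs.flatMap binGroup).length = 4 * hs.length ∧ binVal (hs.flatMap binGroup) = hexNum hs := by
  induction hs with
  | nil => simp [binVal, hexNum]
  | cons c hs ih =>
    have hc := hexVal_lt c (h c (by simp))
    obtain ⟨hl, hv⟩ := binGroupN_spec (hexVal c) hc
    obtain ⟨ihl, ihv⟩ := ih (fun d hd => h d (by simp [hd]))
    rw [List.flatMap_cons]
    constructor
    · simp [List.length_append, binGroup_eq, hl, ihl]; ring
    · rw [binVal_append, binGroup_eq, hv, ihv, ihl]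
      have : hexNum (c :: hs) = hexVal c * 16 ^ hs.length + hexNum hs := by
        rw [show hexNum (c :: hs) = hs.foldl (fun a c => 16 * a + hexVal c) (16 * 0 + hexVal c) from rfl,
          hexNum_foldl]
        ring
      rw [this]
      congr 2
      rw [show (16:Nat) = 2^4 by norm_num, ← pow_mul]

theorem tohex_arg (n : Nat) :
    (PySem.Int.mod ((n : Int) + 2 ^ (32:Int).toNat) (2 ^ (32:Int).toNat)).toNat = n % 2 ^ 32 := by
  rw [PySem.Int.mod_eq_emod_of_pos (by positivity)]
  rw [show ((n : Int) + 2 ^ (32:Int).toNat) = ((n + 2 ^ 32 : Nat) : Int) by push_cast; norm_num]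
  rw [show ((2:Int) ^ (32:Int).toNat) = ((2 ^ 32 : Nat) : Int) by push_cast]
  rw [← Int.natCast_emod]
  simp [Nat.add_mod_right]
  omega

theorem tohex_congr (a b : Nat) (h : a % 2 ^ 32 = b % 2 ^ 32) :
    tohex (a : Int) 32 = tohex (b : Int) 32 := by
  unfold tohex
  rw [tohex_arg a, tohex_arg b, h]

theorem pyRange_map_zero (m : Int) :
    (PySem.List.pyRange 0 m 1).map (fun _ => '0') = List.replicate m.toNat '0' := by
  rw [PySem.List.pyRange_one]
  rw [List.map_map]
  rw [show ((fun _ => '0') ∘ fun k : Nat => (0:Int) + k) = (fun _ => '0') from rfl]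
  rw [List.map_const']
  simp

-- ===== VERDICT helper: the main computation =====
theorem sll_bit_spec : Claim_equal_sll_bit := by
  unfold Claim_equal_sll_bit
  intro e val _dom hpre
  show sll_bit e val = sll_bit_alt e val
  show (tohex (binVal
      (PySem.List.slice
          (((PySem.List.pyRange 0 (8 - PySem.List.len (PySem.List.slice e.toList (some 2) none)) 1).map
                (fun _ => '0') ++ PySem.List.slice e.toList (some 2) none).foldl
            (fun acc elem => acc ++ binGroup elem) ([] : List Char))
          (some (-PySem.List.len (((PySem.List.pyRange 0 (8 - PySem.List.len (PySem.List.slice e.toList (some 2) none)) 1).map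
                (fun _ => '0') ++ PySem.List.slice e.toList (some 2) none).foldl
            (fun acc elem => acc ++ binGroup elem) ([] : List Char)) + val)) none
        ++ (PySem.List.pyRange 0 val 1).map (fun _ => '0'))) 32)
    = tohex ((hexNum (if PySem.List.slice e.toList (some 2) none = [] then ['0']
        else PySem.List.slice e.toList (some 2) none) : Int) * 2 ^ (max val 0).toNat) 32
  rw [PySem.List.slice_from _ (by norm_num : (0:Int) ≤ 2)]
  set s : List Char := e.toList.drop (2:Int).toNat with hs_def
  have hall : ∀ c ∈ s, isHexChar c = true := by
    intro c hc
    have : (e.toList.drop 2).all isHexChar = true := hpre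
    rw [List.all_eq_true] at this
    exact this c hc
  simp only [PySem.List.len_eq, pyRange_map_zero]
  set P : Nat := ((8:Int) - s.length).toNat with hP_def
  set hsl : List Char := List.replicate P '0' ++ s with hhsl_def
  have hallh : ∀ c ∈ hsl, isHexChar c = true := by
    intro c hc
    rcases List.mem_append.mp hc with h | h
    · rw [List.eq_of_mem_replicate h]; decide
    · exact hall c h
  rw [PySem.List.foldl_append_eq_flatMap, List.nil_append]
  obtain ⟨hBlen, hBval⟩ := binVal_flatMap hsl hallh
  set B : List Char := hsl.flatMap binGroup with hB_def
  have hL32 : 32 ≤ B.length := by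
    rw [hBlen, hhsl_def]
    simp only [List.length_append, List.length_replicate]
    omega
  rw [PySem.List.slice_some_none]
  set m : Nat := PySem.List.clampIdx B.length (-(B.length:Int) + val) with hm_def
  have hmle : m ≤ B.length := PySem.List.clampIdx_le _ _
  set t : Nat := val.toNat with ht_def
  -- A's parsed value
  rw [binVal_append, List.length_replicate, binVal_replicate_zero, Nat.add_zero]
  -- B's parsed value equals hexNum s, and its shift amount is t
  have hvs : hexNum (if s = [] then ['0'] else s) = hexNum s := by
    by_cases h : s = []
    · simp [h]; decide
    · simp [h]
  have hmax : (max val 0).toNat = t := by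
    rcases le_total val 0 with h | h
    · rw [max_eq_right h]; omega
    · rw [max_eq_left h]
  rw [hvs, hmax]
  rw [show ((hexNum s : Int) * 2 ^ t) = ((hexNum s * 2 ^ t : Nat) : Int) by push_cast; ring]
  apply tohex_congr
  -- value of the whole hex string
  have hsv : hexNum s = binVal B := by
    rw [hBval, hhsl_def, hexNum_append, hexNum_replicate_zero, Nat.zero_mul, Nat.zero_add]
  rw [hsv]
  -- split B at m
  have hsplit : binVal B = binVal (B.take m) * 2 ^ (B.length - m) + binVal (B.drop m) := by
    conv_lhs => rw [← List.take_append_drop m B]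
    rw [binVal_append, List.length_drop]
  rcases le_or_gt val 0 with hv | hv
  · -- negative or zero shift: the slice is the whole string and the shifter is empty
    have hm0 : m = 0 := by
      rw [hm_def, show (-(B.length:Int) + val) = -((((B.length:Int) - val).toNat : Nat) : Int) by omega,
        PySem.List.clampIdx_neg_natCast _ _ (by omega)]
      omega
    rw [hm0, List.drop_zero]
  · -- positive shift
    have h32 : 32 ≤ (B.length - m) + t := by
      rcases lt_or_ge val (B.length:Int) with hlt | hge
      · have hmt : m = t := by
          rw [hm_def, show (-(B.length:Int) + val) = -((((B.length:Int) - val).toNat : Nat) : Int) by omega,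
            PySem.List.clampIdx_neg_natCast _ _ (by omega)]
          omega
        omega
      · omega
    rw [hsplit]
    rw [show (binVal (B.take m) * 2 ^ (B.length - m) + binVal (B.drop m)) * 2 ^ t
        = binVal (B.drop m) * 2 ^ t + (binVal (B.take m) * 2 ^ ((B.length - m) + t - 32)) * 2 ^ 32 by
      rw [Nat.add_mul, Nat.mul_assoc, ← pow_add, Nat.mul_assoc, ← pow_add,
        show (B.length - m) + t - 32 + 32 = (B.length - m) + t by omega]
      ring]
    rw [Nat.add_mul_mod_self_right]
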